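-- pv_equiv track=rewrite | github.com/genenetwork/genenetwork2 | web/webqtl/correlationMatrix/TissueCorrelationPage.py | mappedByTargetList
-- ===== SOURCE A (Python) =====
-- def mappedByTargetList(primaryList=[],targetList=[]):
--
-- 	tempPrimaryList =[x.lower() for x in primaryList]
-- 	testTargetList =[y.lower() for y in targetList]
--
-- 	for i, item in enumerate(tempPrimaryList):
-- 		if item in testTargetList:
-- 			index = testTargetList.index(item)
-- 			if primaryList[i]!=targetList[index]:
-- 				targetList[index]= primaryList[i]
--
-- 	return	targetList
-- ===== SOURCE B (Python) =====
-- def mappedByTargetList(primaryList=[], targetList=[]):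
--     # Build lower-cased primary -> primary, last occurrence wins (dict overwrite).
--     lastPrimary = {}
--     for p in primaryList:
--         lastPrimary[p.lower()] = p
--     # Single pass over targetList; only the first occurrence (case-insensitively)
--     # of each value may be replaced, matching A's use of list.index.
--     seen = set()
--     for i, x in enumerate(targetList):
--         t = x.lower()
--         if t not in seen:
--             seen.add(t)
--             if t in lastPrimary:
--                 targetList[i] = lastPrimary[t]
--     return targetList
-- ===== Notes on version B (the rewrite author's own statement) =====
-- stated objective: faster
-- what changed: Replaces the per-primary scans of the target list (membership test plus list.index inside the loop) by a hash index: one dict mapping lowercased primary to its last occurrence and one indexed pass over targetList with a seen-set so only first occurrences are replaced.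
import Mathlib
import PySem

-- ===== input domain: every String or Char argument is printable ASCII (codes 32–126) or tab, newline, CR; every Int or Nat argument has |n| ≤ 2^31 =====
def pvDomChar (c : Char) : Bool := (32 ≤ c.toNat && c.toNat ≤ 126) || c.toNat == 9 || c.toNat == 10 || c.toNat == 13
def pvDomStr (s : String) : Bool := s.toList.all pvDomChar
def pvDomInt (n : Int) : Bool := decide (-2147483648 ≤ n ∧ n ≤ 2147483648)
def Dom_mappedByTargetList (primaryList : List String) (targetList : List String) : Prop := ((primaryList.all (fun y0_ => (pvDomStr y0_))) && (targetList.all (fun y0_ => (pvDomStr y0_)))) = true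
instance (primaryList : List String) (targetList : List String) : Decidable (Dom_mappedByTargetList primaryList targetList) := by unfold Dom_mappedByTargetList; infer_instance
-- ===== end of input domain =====

-- B replaces A's per-primary scans of the target list by a dict index plus one seen-set pass
-- over targetList (faster); equivalence is about the RETURN value (both mutate targetList to
-- the same final content in Python).

-- ===== PORT A =====
def mappedByTargetList (primaryList : List String) (targetList : List String) : List String :=
  let tempPrimaryList := primaryList.map (fun x => PySem.Str.lower x)
  let testTargetList := targetList.map (fun y => PySem.Str.lower y)
  (PySem.List.enumerate tempPrimaryList 0).foldl (fun tl ip =>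
    if testTargetList.contains ip.2 then
      match PySem.List.index? testTargetList ip.2 with
      | some index =>
        if PySem.List.pyGetD primaryList ip.1 "" ≠ PySem.List.pyGetD tl (index : Int) "" then
          PySem.List.pySetD tl (index : Int) (PySem.List.pyGetD primaryList ip.1 "")
        else tl
      | none => tl  -- unreachable: guarded by the membership test
    else tl) targetList

-- ===== PORT B =====
-- the indexed loop 'for i, x in enumerate(targetList)' assigning each index at most once,
-- as a structural pass carrying the 'seen' set
def pvAltGo (last : PySem.Dict String String) (seen : PySem.Set String) : List String → List String
  | [] => []
  | x :: xs =>
    let t := PySem.Str.lower x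
    if PySem.Set.contains seen t then x :: pvAltGo last seen xs
    else (match last.get? t with
          | some v => v
          | none => x) :: pvAltGo last (PySem.Set.add seen t) xs

def mappedByTargetList_alt (primaryList : List String) (targetList : List String) : List String :=
  let lastPrimary := primaryList.foldl (fun d p => d.insert (PySem.Str.lower p) p) PySem.Dict.empty
  pvAltGo lastPrimary PySem.Set.empty targetList

-- ===== PRECONDITION & SPEC =====
def Spec_mappedByTargetList (primaryList : List String) (targetList : List String) (out : List String) : Prop := out = mappedByTargetList_alt primaryList targetList
instance (primaryList : List String) (targetList : List String) (out : List String) : Decidable (Spec_mappedByTargetList primaryList targetList out) := by unfold Spec_mappedByTargetList; infer_instance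

-- ===== CLAIM (what is proved, stated in full; the proofs are below) =====
def Claim_equal_mappedByTargetList : Prop := ∀ (primaryList : List String) (targetList : List String), Dom_mappedByTargetList primaryList targetList → Spec_mappedByTargetList primaryList targetList (mappedByTargetList primaryList targetList)

-- ===== LEMMAS AND PROOFS =====

def pvLower (s : String) : String := PySem.Str.lower s

-- value-level effect of one iteration of A's loop on the target list
def pvStep (T : List String) (tl : List String) (p : String) : List String :=
  match PySem.List.index? T (pvLower p) with
  | some k => tl.set k p
  | none => tl

-- last p in ps with pvLower p = t
def pvLastMatch (t : String) : List String → Option String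
  | [] => none
  | p :: ps =>
    match pvLastMatch t ps with
    | some q => some q
    | none => if pvLower p = t then some p else none

theorem pv_set_self {l : List String} {k : Nat} {a : String}
    (h : l[k]? = some a) : l.set k a = l := by
  obtain ⟨hk, he⟩ := List.getElem?_eq_some_iff.mp h
  rw [← he]
  exact List.set_getElem_self hk

theorem pv_enum_fold (P T : List String) :
    ∀ (ps pre tl : List String), P = pre ++ ps →
    (PySem.List.enumerate (ps.map pvLower) (pre.length : Int)).foldl (fun tl ip =>
      if T.contains ip.2 then
        match PySem.List.index? T ip.2 with
        | some index =>
          if PySem.List.pyGetD P ip.1 "" ≠ PySem.List.pyGetD tl (index : Int) "" then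
            PySem.List.pySetD tl (index : Int) (PySem.List.pyGetD P ip.1 "")
          else tl
        | none => tl
      else tl) tl
    = ps.foldl (pvStep T) tl := by
  intro ps
  induction ps with
  | nil => intro pre tl h; simp
  | cons p ps ih =>
    intro pre tl h
    rw [List.map_cons, PySem.List.enumerate_cons, List.foldl_cons, List.foldl_cons]
    have hbody : (if T.contains (pvLower p) then
        match PySem.List.index? T (pvLower p) with
        | some index =>
          if PySem.List.pyGetD P ((pre.length : Int)) "" ≠ PySem.List.pyGetD tl (index : Int) "" then
            PySem.List.pySetD tl (index : Int) (PySem.List.pyGetD P ((pre.length : Int)) "")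
          else tl
        | none => tl
      else tl) = pvStep T tl p := by
      have hP : PySem.List.pyGetD P ((pre.length : Int)) "" = p := by
        rw [PySem.List.pyGetD_natCast, h]
        simp [List.getD]
      by_cases hc : (pvLower p) ∈ T
      · have : T.contains (pvLower p) = true := by simpa using hc
        rw [this, if_pos rfl]
        have hidx : (PySem.List.index? T (pvLower p)).isSome := by
          rw [PySem.List.index?_isSome_iff]; exact hc
        obtain ⟨k, hk⟩ := Option.isSome_iff_exists.mp hidx
        rw [hk, pvStep, hk, hP]
        show (if p ≠ PySem.List.pyGetD tl ((k : Int)) "" then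
            PySem.List.pySetD tl ((k : Int)) p else tl) = tl.set k p
        by_cases hne : p ≠ PySem.List.pyGetD tl ((k : Int)) ""
        · rw [if_pos hne, PySem.List.pySetD_natCast]
        · rw [if_neg hne]
          simp only [ne_eq, not_not] at hne
          rw [PySem.List.pyGetD_natCast] at hne
          by_cases hkl : k < tl.length
          · have : tl[k]? = some p := by
              rw [List.getElem?_eq_some_iff]
              exact ⟨hkl, by simpa [List.getD, List.getElem?_eq_getElem hkl] using hne.symm⟩
            rw [pv_set_self this]
          · rw [List.set_eq_of_length_le (by omega)]
      · have h1 : T.contains (pvLower p) = false := by simpa using hc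
        have h2 : PySem.List.index? T (pvLower p) = none :=
          (PySem.List.index?_eq_none_iff _ _).mpr hc
        rw [h1, pvStep, h2]
        simp
    rw [hbody]
    have hlen : (pre.length : Int) + 1 = ((pre ++ [p]).length : Int) := by
      simp
    rw [hlen, ih (pre ++ [p]) (pvStep T tl p) (by simp [h])]

theorem pv_index?_first (T : List String) (j : Nat) (t : String) (hj : T[j]? = some t) :
    PySem.List.index? T t = some j ↔ t ∉ T.take j := by
  constructor
  · intro h
    obtain ⟨pre, suf, hT, hlen, hnm⟩ := (PySem.List.index?_eq_some_iff _ _ _).mp h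
    have : T.take j = pre := by
      rw [hT, ← hlen, List.take_left]
    rw [this]; exact hnm
  · intro hnm
    apply (PySem.List.index?_eq_some_iff _ _ _).mpr
    obtain ⟨hjl, hget⟩ := List.getElem?_eq_some_iff.mp hj
    refine ⟨T.take j, T.drop (j + 1), ?_, by simp [List.length_take]; omega, hnm⟩
    rw [← hget, List.getElem_cons_drop, List.take_append_drop]

-- pointwise description of A's loop (the state's lowering stays equal to T throughout)
theorem pv_foldA_get (T : List String) :
    ∀ (ps tl : List String), tl.map pvLower = T →
    ∀ j : Nat, (ps.foldl (pvStep T) tl)[j]? = (tl[j]?).map (fun v =>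
      if PySem.List.index? T (pvLower v) = some j then
        (pvLastMatch (pvLower v) ps).getD v
      else v) := by
  intro ps
  induction ps with
  | nil => intro tl hT j; cases htl : tl[j]? <;> simp [pvLastMatch, htl]
  | cons p ps ih =>
    intro tl hT j
    rw [List.foldl_cons]
    cases hidx : PySem.List.index? T (pvLower p) with
    | none =>
      have hstep : pvStep T tl p = tl := by rw [pvStep, hidx]
      rw [hstep, ih tl hT j]
      cases htl : tl[j]? with
      | none => rfl
      | some v =>
        simp only [Option.map_some]
        congr 1
        by_cases hc : PySem.List.index? T (pvLower v) = some j
        · rw [if_pos hc, if_pos hc]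
          have hne : pvLower p ≠ pvLower v := by
            intro he; rw [he, hc] at hidx; simp at hidx
          simp [pvLastMatch]
          cases pvLastMatch (pvLower v) ps <;> simp [hne]
        · rw [if_neg hc, if_neg hc]
    | some k =>
      have hstep : pvStep T tl p = tl.set k p := by rw [pvStep, hidx]
      have hTk : T[k]? = some (pvLower p) := by
        obtain ⟨pre, suf, hTe, hlen, _⟩ := (PySem.List.index?_eq_some_iff _ _ _).mp hidx
        rw [hTe, ← hlen]
        simp
      have hkl : k < tl.length := by
        have : k < T.length := List.getElem?_eq_some_iff.mp hTk |>.1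
        rw [← hT, List.length_map] at this; exact this
      have hT' : (tl.set k p).map pvLower = T := by
        rw [List.map_set, ← hT]
        apply pv_set_self
        rw [hT, hTk]
      rw [hstep, ih (tl.set k p) hT' j]
      by_cases hjk : j = k
      · subst hjk
        have hset : (tl.set j p)[j]? = some p := by
          rw [List.getElem?_set]
          simp [hkl]
        obtain ⟨v, hv⟩ : ∃ v, tl[j]? = some v :=
          Option.isSome_iff_exists.mp (by simp; exact hkl)
        have hlv : pvLower v = pvLower p := by
          have : (tl.map pvLower)[j]? = some (pvLower v) := by simp [hv]
          rw [hT, hTk] at this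
          exact (Option.some.inj this).symm
        rw [hset, hv]
        simp only [Option.map_some]
        congr 1
        rw [hlv, if_pos hidx, if_pos hidx]
        simp [pvLastMatch]
        cases pvLastMatch (pvLower p) ps <;> simp
      · rw [List.getElem?_set_ne (by omega : k ≠ j)]
        cases htl : tl[j]? with
        | none => rfl
        | some v =>
          simp only [Option.map_some]
          congr 1
          by_cases hc : PySem.List.index? T (pvLower v) = some j
          · rw [if_pos hc, if_pos hc]
            have hne : pvLower p ≠ pvLower v := by
              intro he; rw [he, hc] at hidx
              exact hjk (Option.some.inj hidx)
            simp [pvLastMatch]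
            cases pvLastMatch (pvLower v) ps <;> simp [hne]
          · rw [if_neg hc, if_neg hc]

-- the dict of B is pvLastMatch
theorem pv_dict_get (t : String) :
    ∀ (ps : List String) (d : PySem.Dict String String),
    (ps.foldl (fun d p => d.insert (PySem.Str.lower p) p) d).get? t =
      match pvLastMatch t ps with
      | some q => some q
      | none => d.get? t := by
  intro ps
  induction ps with
  | nil => intro d; simp [pvLastMatch]
  | cons p ps ih =>
    intro d
    rw [List.foldl_cons, ih]
    have hins : (d.insert (PySem.Str.lower p) p).get? t =
        if t = pvLower p then some p else d.get? t := PySem.Dict.get?_insert d (PySem.Str.lower p) t p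
    simp only [pvLastMatch]
    cases pvLastMatch t ps with
    | some q => simp
    | none =>
      simp only [hins]
      by_cases he : pvLower p = t
      · rw [if_pos he, if_pos he.symm]
      · rw [if_neg he, if_neg (fun h => he h.symm)]

-- pointwise description of B's pass
theorem pv_altGo_get (d : PySem.Dict String String) :
    ∀ (xs : List String) (seen : PySem.Set String) (j : Nat),
    (pvAltGo d seen xs)[j]? = (xs[j]?).map (fun v =>
      if pvLower v ∈ seen ∨ pvLower v ∈ (xs.take j).map pvLower then v
      else ((d.get? (pvLower v)).getD v)) := by
  intro xs
  induction xs with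
  | nil => intro seen j; simp [pvAltGo]
  | cons x xs ih =>
    intro seen j
    rw [pvAltGo]
    by_cases hc : pvLower x ∈ seen
    · have : PySem.Set.contains seen (PySem.Str.lower x) = true := by
        simpa [pvLower] using (PySem.Set.contains_iff seen (pvLower x)).mpr hc
      simp only [this, if_pos]
      cases j with
      | zero => simp [hc]
      | succ j =>
        simp only [List.getElem?_cons_succ, ih seen j, List.take_succ_cons, List.map_cons]
        cases hx : xs[j]? with
        | none => rfl
        | some v =>
          simp only [Option.map_some]
          congr 1
          by_cases hcv : pvLower v ∈ seen ∨ pvLower v ∈ (xs.take j).map pvLower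
          · rw [if_pos hcv, if_pos (by
              rcases hcv with h | h
              · exact Or.inl h
              · exact Or.inr (List.mem_cons_of_mem _ h))]
          · rw [if_neg hcv, if_neg (by
              intro h
              rcases h with h | h
              · exact hcv (Or.inl h)
              · rcases List.mem_cons.mp h with h | h
                · exact hcv (Or.inl (h ▸ hc))
                · exact hcv (Or.inr h))]
    · have : PySem.Set.contains seen (PySem.Str.lower x) = false := by
        have := (PySem.Set.contains_iff seen (pvLower x))
        simp only [pvLower] at this
        by_cases hb : PySem.Set.contains seen (PySem.Str.lower x) = true
        · exact absurd (this.mp hb) (by simpa [pvLower] using hc)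
        · simpa using hb
      simp only [this]
      cases j with
      | zero =>
        simp only [if_neg (Bool.false_ne_true), List.getElem?_cons_zero, Option.map_some]
        have : ¬ (pvLower x ∈ seen ∨ pvLower x ∈ (List.take 0 (x :: xs)).map pvLower) := by
          simp [hc]
        rw [if_neg this]
        cases hd : d.get? (pvLower x) <;> simp [pvLower] at hd ⊢ <;> rw [hd]
      | succ j =>
        simp only [if_neg (Bool.false_ne_true), List.getElem?_cons_succ,
          ih (PySem.Set.add seen (PySem.Str.lower x)) j, List.take_succ_cons, List.map_cons]
        cases hx : xs[j]? with
        | none => rfl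
        | some v =>
          simp only [Option.map_some]
          congr 1
          have hmem : pvLower v ∈ PySem.Set.add seen (PySem.Str.lower x) ↔
              pvLower v ∈ seen ∨ pvLower v = pvLower x := PySem.Set.mem_add _ _ _
          by_cases hcv : pvLower v ∈ PySem.Set.add seen (PySem.Str.lower x) ∨
              pvLower v ∈ (xs.take j).map pvLower
          · rw [if_pos hcv, if_pos (by
              rcases hcv with h | h
              · rcases hmem.mp h with h | h
                · exact Or.inl h
                · exact Or.inr (List.mem_cons.mpr (Or.inl h))
              · exact Or.inr (List.mem_cons_of_mem _ h))]
          · rw [if_neg hcv, if_neg (by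
              intro h
              rcases h with h | h
              · exact hcv (Or.inl (hmem.mpr (Or.inl h)))
              · rcases List.mem_cons.mp h with h | h
                · exact hcv (Or.inl (hmem.mpr (Or.inr h)))
                · exact hcv (Or.inr h))]

-- ===== VERDICT (by name: the statement is the Claim_ definition above) =====
theorem mappedByTargetList_spec : Claim_equal_mappedByTargetList := by
  intro P L _
  unfold Spec_mappedByTargetList mappedByTargetList mappedByTargetList_alt
  simp only []
  have h0 : PySem.List.enumerate (List.map (fun y => PySem.Str.lower y) P) =
      PySem.List.enumerate (List.map pvLower P) ((([] : List String).length : Nat) : Int) := rfl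
  rw [h0, pv_enum_fold P (L.map (fun y => PySem.Str.lower y)) P [] L (by simp)]
  apply List.ext_getElem?
  intro j
  have hTdef : L.map (fun y => PySem.Str.lower y) = L.map pvLower := rfl
  rw [hTdef, pv_foldA_get (L.map pvLower) P L rfl j, pv_altGo_get _ L PySem.Set.empty j]
  cases hL : L[j]? with
  | none => rfl
  | some v =>
    simp only [Option.map_some]
    congr 1
    have hTj : (L.map pvLower)[j]? = some (pvLower v) := by simp [hL]
    have hfirst := pv_index?_first (L.map pvLower) j (pvLower v) hTj
    have hseen : ¬ (pvLower v ∈ (PySem.Set.empty : PySem.Set String) ∨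
        pvLower v ∈ (L.take j).map pvLower) ↔ pvLower v ∉ (L.map pvLower).take j := by
      simp [PySem.Set.empty, List.map_take]
    have hdict : (P.foldl (fun d p => d.insert (PySem.Str.lower p) p) PySem.Dict.empty).get? (pvLower v) =
        match pvLastMatch (pvLower v) P with
        | some q => some q
        | none => none := by
      rw [pv_dict_get (pvLower v) P PySem.Dict.empty]
      cases pvLastMatch (pvLower v) P <;> simp [PySem.Dict.empty, PySem.Dict.get?]
    by_cases hidx : PySem.List.index? (L.map pvLower) (pvLower v) = some j
    · rw [if_pos hidx, if_neg (hseen.mpr (hfirst.mp hidx)), hdict]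
      cases pvLastMatch (pvLower v) P <;> simp
    · have hm : pvLower v ∈ (PySem.Set.empty : PySem.Set String) ∨
          pvLower v ∈ (L.take j).map pvLower := by
        by_contra hmm
        exact hidx (hfirst.mpr (hseen.mp hmm))
      rw [if_neg hidx, if_pos hm]
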